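-- pv_equiv track=rewrite | github.com/PARK4139/auto_flow | pk_internal_tools/pk_functions/dom_snapshot_analyzer.py | analyze_buttons_for_keywords
-- ===== SOURCE A (Python) =====
-- from typing import List
--
-- DEFAULT_BUTTON_KEYWORD_SETS = [
--     ["나만의 스마트 홈 만들기", "Create my smart home"],
--     ["계정 만들기", "Create account", "완료"]
-- ]
--
-- def analyze_buttons_for_keywords(buttons: List[str], keyword_sets=None) -> List[str]:
--     if keyword_sets is None:
--         keyword_sets = DEFAULT_BUTTON_KEYWORD_SETS
--
--     matches = []
--     for keywords in keyword_sets: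
--         for button_text in buttons:
--             if any(keyword in button_text for keyword in keywords):
--                 matches.append(button_text)
--                 break
--     return matches
-- ===== SOURCE B (Python) =====
-- DEFAULT_BUTTON_KEYWORD_SETS = [
--     ["나만의 스마트 홈 만들기", "Create my smart home"],
--     ["계정 만들기", "Create account", "완료"]
-- ]
--
--
-- def analyze_buttons_for_keywords(buttons, keyword_sets=None):
--     if keyword_sets is None:
--         keyword_sets = DEFAULT_BUTTON_KEYWORD_SETS
--
--     # single pass over buttons: keep the keyword sets not yet matched,
--     # record per set-index the first matching button, rebuild in set order
--     remaining = list(enumerate(keyword_sets))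
--     found = {}
--     for button in buttons:
--         if not remaining:
--             break
--         still = []
--         for i, keywords in remaining:
--             if any(k in button for k in keywords):
--                 found[i] = button
--             else:
--                 still.append((i, keywords))
--         remaining = still
--     return [found[i] for i in range(len(keyword_sets)) if i in found]
-- ===== Notes on version B (the rewrite author's own statement) =====
-- stated objective: alternative
-- what changed: Inverted the loop nesting: instead of scanning all buttons once per keyword set, B makes a single pass over the buttons maintaining the still-unmatched (index, keywords) pairs and a dict of first matches (with an early break once every set is matched), then rebuilds the result in keyword-set order.
import Mathlib
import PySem

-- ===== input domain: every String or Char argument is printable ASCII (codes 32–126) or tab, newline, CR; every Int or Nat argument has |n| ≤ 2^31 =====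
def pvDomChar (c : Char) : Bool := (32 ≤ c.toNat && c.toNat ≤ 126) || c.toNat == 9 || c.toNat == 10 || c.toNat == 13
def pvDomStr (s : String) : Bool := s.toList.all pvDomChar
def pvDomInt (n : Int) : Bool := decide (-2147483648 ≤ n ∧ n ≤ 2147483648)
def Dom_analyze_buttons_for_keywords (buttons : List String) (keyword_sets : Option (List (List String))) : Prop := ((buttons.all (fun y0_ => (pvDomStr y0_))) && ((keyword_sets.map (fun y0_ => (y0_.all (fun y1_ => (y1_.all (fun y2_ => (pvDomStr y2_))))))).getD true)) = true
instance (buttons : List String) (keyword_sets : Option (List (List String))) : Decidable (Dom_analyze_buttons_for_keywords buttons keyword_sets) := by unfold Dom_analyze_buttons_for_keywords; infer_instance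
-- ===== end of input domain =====

-- B inverts A's nested loops: one pass over the buttons maintaining the not-yet-matched
-- keyword sets and a dict of first ms, rebuilt in keyword-set order (alternative
-- decomposition, same result; return-value equivalence).

-- shared constant and the match predicate both Pythons spell out textually
def pvDefaultKeywordSets : List (List String) :=
  [["나만의 스마트 홈 만들기", "Create my smart home"],
   ["계정 만들기", "Create account", "완료"]]

def pvKwMatch (keywords : List String) (button : String) : Bool :=
  keywords.any (fun k => PySem.Str.isIn k button)

-- ===== PORT A =====
-- inner 'for button_text in buttons: … break' loop with the running ms list
def pvLoopA (keywords : List String) : List String → List String → List String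
  | [], ms => ms
  | b :: rest, ms =>
    if pvKwMatch keywords b then ms ++ [b] else pvLoopA keywords rest ms

def analyze_buttons_for_keywords (buttons : List String) (keyword_sets : Option (List (List String))) : List String :=
  let ks := keyword_sets.getD pvDefaultKeywordSets
  ks.foldl (fun ms keywords => pvLoopA keywords buttons ms) []

-- ===== PORT B =====
-- one button against every still-unmatched (index, keywords) pair
def pvStepB (button : String) (rem : List (Int × List String)) (found : PySem.Dict Int String) :
    List (Int × List String) × PySem.Dict Int String :=
  rem.foldl
    (fun acc p =>
      if pvKwMatch p.2 button then (acc.1, acc.2.insert p.1 button)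
      else (acc.1 ++ [p], acc.2))
    ([], found)

-- the pass over buttons with the early break once everything matched
def pvLoopB : List String → List (Int × List String) → PySem.Dict Int String → PySem.Dict Int String
  | [], _, found => found
  | button :: rest, rem, found =>
    if rem.isEmpty then found
    else
      let s := pvStepB button rem found
      pvLoopB rest s.1 s.2

def analyze_buttons_for_keywords_alt (buttons : List String) (keyword_sets : Option (List (List String))) : List String :=
  let ks := keyword_sets.getD pvDefaultKeywordSets
  let found := pvLoopB buttons (PySem.List.enumerate ks 0) PySem.Dict.empty
  (PySem.List.pyRange 0 ks.length 1).foldl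
    (fun acc i =>
      match found.get? i with
      | some v => acc ++ [v]
      | none => acc)
    []

-- ===== PRECONDITION & SPEC =====
def Spec_analyze_buttons_for_keywords (buttons : List String) (keyword_sets : Option (List (List String))) (out : List String) : Prop := out = analyze_buttons_for_keywords_alt buttons keyword_sets
instance (buttons : List String) (keyword_sets : Option (List (List String))) (out : List String) : Decidable (Spec_analyze_buttons_for_keywords buttons keyword_sets out) := by unfold Spec_analyze_buttons_for_keywords; infer_instance

-- ===== CLAIM (what is proved, stated in full; the proofs are below) =====
def Claim_equal_analyze_buttons_for_keywords : Prop := ∀ (buttons : List String) (keyword_sets : Option (List (List String))), Dom_analyze_buttons_for_keywords buttons keyword_sets → Spec_analyze_buttons_for_keywords buttons keyword_sets (analyze_buttons_for_keywords buttons keyword_sets)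

-- ===== LEMMAS AND PROOFS =====

-- A's inner loop is "first matching button, appended"
theorem pvLoopA_eq (kws : List String) : ∀ (bs m : List String),
    pvLoopA kws bs m = m ++ (bs.find? (pvKwMatch kws)).toList := by
  intro bs
  induction bs with
  | nil => intro m; simp [pvLoopA]
  | cons b rest ih =>
    intro m
    cases h : pvKwMatch kws b
    · simp only [pvLoopA, h, Bool.false_eq_true, if_false]
      rw [ih]
      simp [List.find?, h]
    · simp [pvLoopA, h, List.find?]

-- A's outer fold collects those first ms
theorem pvFoldA_eq (buttons : List String) : ∀ (l : List (List String)) (init : List String),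
    l.foldl (fun ms keywords => pvLoopA keywords buttons ms) init =
      init ++ l.filterMap (fun kws => buttons.find? (pvKwMatch kws)) := by
  intro l
  induction l with
  | nil => intro init; simp
  | cons kws rest ih =>
    intro init
    rw [List.foldl_cons, ih, pvLoopA_eq]
    cases h : buttons.find? (pvKwMatch kws) <;> simp [List.filterMap_cons, h]

theorem pvA_eq (buttons : List String) (ks : List (List String)) :
    (ks.foldl (fun ms keywords => pvLoopA keywords buttons ms) []) =
      ks.filterMap (fun kws => buttons.find? (pvKwMatch kws)) := by
  simpa using pvFoldA_eq buttons ks []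

-- the step fold acts componentwise: first component filters, second records ms
theorem pvStepB_foldl_fst (button : String) : ∀ (rem : List (Int × List String))
    (st : List (Int × List String)) (fd : PySem.Dict Int String),
    (rem.foldl
      (fun acc p =>
        if pvKwMatch p.2 button then (acc.1, acc.2.insert p.1 button)
        else (acc.1 ++ [p], acc.2)) (st, fd)).1 =
      st ++ rem.filter (fun p => !pvKwMatch p.2 button) := by
  intro rem
  induction rem with
  | nil => intro st fd; simp
  | cons p rest ih =>
    intro st fd
    by_cases h : pvKwMatch p.2 button = true <;>
      simp [List.foldl_cons, h, ih]

theorem pvStepB_foldl_get? (button : String) : ∀ (rem : List (Int × List String))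
    (st : List (Int × List String)) (fd : PySem.Dict Int String) (i : Int),
    ((rem.foldl
      (fun acc p =>
        if pvKwMatch p.2 button then (acc.1, acc.2.insert p.1 button)
        else (acc.1 ++ [p], acc.2)) (st, fd)).2.get? i) =
      (if rem.any (fun p => p.1 == i && pvKwMatch p.2 button) then some button else fd.get? i) := by
  intro rem
  induction rem with
  | nil => intro st fd i; simp
  | cons p rest ih =>
    intro st fd i
    cases h : pvKwMatch p.2 button
    · rw [List.foldl_cons]
      simp only [h, Bool.false_eq_true, if_false]
      rw [ih, List.any_cons]
      simp only [h, Bool.and_false, Bool.false_or]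
    · rw [List.foldl_cons]
      simp only [h, if_true]
      rw [ih]
      cases hr : rest.any (fun p => p.1 == i && pvKwMatch p.2 button)
      · simp only [hr, Bool.false_eq_true, if_false]
        rw [PySem.Dict.get?_insert]
        by_cases hik : i = p.1
        · simp [List.any_cons, hik, h, hr]
        · have hik' : (p.1 == i) = false := by simp [Ne.symm hik]
          simp [List.any_cons, hik, hik', h, hr]
      · simp [hr, List.any_cons]

theorem pvStepB_fst (button : String) (rem : List (Int × List String)) (fd : PySem.Dict Int String) :
    (pvStepB button rem fd).1 = rem.filter (fun p => !pvKwMatch p.2 button) := by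
  simpa [pvStepB] using pvStepB_foldl_fst button rem [] fd

theorem pvStepB_get? (button : String) (rem : List (Int × List String)) (fd : PySem.Dict Int String) (i : Int) :
    (pvStepB button rem fd).2.get? i =
      (if rem.any (fun p => p.1 == i && pvKwMatch p.2 button) then some button else fd.get? i) := by
  simpa [pvStepB] using pvStepB_foldl_get? button rem [] fd i

theorem pvKeyUnique {l : List (Int × List String)} (h : (l.map Prod.fst).Nodup)
    {i : Int} {kws : List String} {p : Int × List String}
    (h1 : (i, kws) ∈ l) (h2 : p ∈ l) (h3 : p.1 = i) : p = (i, kws) := by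
  have := List.inj_on_of_nodup_map h h2 h1 (by simp [h3])
  exact this

-- the main invariant of B's button loop
theorem pvLoopB_invariant (i : Int) : ∀ (bs : List String) (rem : List (Int × List String))
    (found : PySem.Dict Int String), (rem.map Prod.fst).Nodup →
    ((∀ kws, (i, kws) ∈ rem → found.get? i = none →
        (pvLoopB bs rem found).get? i = bs.find? (pvKwMatch kws)) ∧
     (i ∉ rem.map Prod.fst → (pvLoopB bs rem found).get? i = found.get? i)) := by
  intro bs
  induction bs with
  | nil =>
    intro rem found hnd
    constructor
    · intro kws _ hnone; simpa [pvLoopB] using hnone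
    · intro _; simp [pvLoopB]
  | cons b rest ih =>
    intro rem found hnd
    have hnd' : ((rem.filter (fun p => !pvKwMatch p.2 b)).map Prod.fst).Nodup := by
      exact List.Nodup.sublist (List.Sublist.map Prod.fst (rem.filter_sublist)) hnd
    constructor
    · intro kws hmem hnone
      have hne : rem.isEmpty = false := by
        cases rem with
        | nil => cases hmem
        | cons _ _ => rfl
      rw [pvLoopB]
      simp only [hne, Bool.false_eq_true, if_false]
      rw [pvStepB_fst]
      by_cases hm : pvKwMatch kws b = true
      · -- matched now: key i leaves rem, dict pins button b
        have hany : rem.any (fun p => p.1 == i && pvKwMatch p.2 b) = true := by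
          simp only [List.any_eq_true]
          exact ⟨(i, kws), hmem, by simp [hm]⟩
        have hnotin : i ∉ (rem.filter (fun p => !pvKwMatch p.2 b)).map Prod.fst := by
          intro hin
          simp only [List.mem_map] at hin
          obtain ⟨p, hp, hpi⟩ := hin
          have hpmem := List.mem_of_mem_filter hp
          have := pvKeyUnique hnd hmem hpmem hpi
          subst this
          have := List.of_mem_filter hp
          simp [hm] at this
        have := (ih (rem.filter (fun p => !pvKwMatch p.2 b)) (pvStepB b rem found).2 hnd').2 hnotin
        rw [this, pvStepB_get?, if_pos hany]
        simp [List.find?, hm]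
      · -- not matched: key i stays with its keywords, dict untouched at i
        have hmem' : (i, kws) ∈ rem.filter (fun p => !pvKwMatch p.2 b) := by
          exact List.mem_filter.2 ⟨hmem, by simp [hm]⟩
        have hany : rem.any (fun p => p.1 == i && pvKwMatch p.2 b) = false := by
          rw [List.any_eq_false]
          intro p hp
          by_cases hpi : p.1 = i
          · have := pvKeyUnique hnd hmem hp hpi
            subst this
            simp [hm]
          · simp [hpi]
        have hnone' : (pvStepB b rem found).2.get? i = none := by
          rw [pvStepB_get?, hany]
          simpa using hnone
        have := (ih (rem.filter (fun p => !pvKwMatch p.2 b)) (pvStepB b rem found).2 hnd').1 kws hmem' hnone'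
        rw [this]
        simp [List.find?, hm]
    · intro hnotin
      rw [pvLoopB]
      by_cases hne : rem.isEmpty = true
      · simp [hne]
      · simp only [hne, Bool.false_eq_true, if_false]
        have hnotin' : i ∉ (pvStepB b rem found).1.map Prod.fst := by
          rw [pvStepB_fst]
          intro hin
          exact hnotin (List.mem_map.2 (by
            obtain ⟨p, hp, hpi⟩ := List.mem_map.1 hin
            exact ⟨p, List.mem_of_mem_filter hp, hpi⟩))
        have hrec := (ih (pvStepB b rem found).1 (pvStepB b rem found).2 (by
          rw [pvStepB_fst]
          exact List.Nodup.sublist (List.Sublist.map Prod.fst (rem.filter_sublist)) hnd)).2 hnotin'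
        rw [hrec, pvStepB_get?]
        have hany : rem.any (fun p => p.1 == i && pvKwMatch p.2 b) = false := by
          rw [List.any_eq_false]
          intro p hp
          have : p.1 ≠ i := by
            intro hpi
            exact hnotin (List.mem_map.2 ⟨p, hp, hpi⟩)
          simp [this]
        simp [hany]

-- the final comprehension fold collects the dict's values over the range
theorem pvFoldRange_eq (found : PySem.Dict Int String) : ∀ (l : List Int) (acc : List String),
    (l.foldl
      (fun acc i =>
        match found.get? i with
        | some v => acc ++ [v]
        | none => acc) acc) = acc ++ l.filterMap (fun i => found.get? i) := by
  intro l
  induction l with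
  | nil => intro acc; simp
  | cons i rest ih =>
    intro acc
    rw [List.foldl_cons]
    cases h : found.get? i <;> simp [h, ih, List.filterMap_cons]

theorem pvFilterMapRange {α β : Type} (l : List α) (F : α → Option β) :
    (List.range l.length).filterMap (fun k => l[k]?.bind F) = l.filterMap F := by
  induction l with
  | nil => simp
  | cons x xs ih =>
    rw [List.length_cons, List.range_succ_eq_map, List.filterMap_cons]
    cases h : F x <;>
      simp_all [List.filterMap_map, Function.comp, List.filterMap_cons]

theorem pvB_eq (buttons : List String) (keyword_sets : Option (List (List String))) :
    analyze_buttons_for_keywords_alt buttons keyword_sets =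
      (keyword_sets.getD pvDefaultKeywordSets).filterMap (fun kws => buttons.find? (pvKwMatch kws)) := by
  unfold analyze_buttons_for_keywords_alt
  generalize (keyword_sets.getD pvDefaultKeywordSets) = ks
  rw [pvFoldRange_eq]
  have hrange : PySem.List.pyRange 0 (ks.length : Int) 1 =
      (List.range ks.length).map (fun k : Nat => ((k : Int))) := by
    rw [PySem.List.pyRange_one]
    simp
  rw [hrange, List.filterMap_map, List.nil_append,
    ← pvFilterMapRange ks (fun kws => buttons.find? (pvKwMatch kws))]
  apply List.filterMap_congr
  intro k hk
  have hk' : k < ks.length := List.mem_range.1 hk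
  have hnd : ((PySem.List.enumerate ks 0).map Prod.fst).Nodup := by
    rw [PySem.List.map_fst_enumerate]
    exact PySem.List.nodup_pyRange_one _ _
  have hmem : ((k : Int), ks[k]) ∈ PySem.List.enumerate ks 0 := by
    rw [PySem.List.mem_enumerate_iff]
    exact ⟨k, hk', by simp⟩
  have := (pvLoopB_invariant (k : Int) buttons (PySem.List.enumerate ks 0) PySem.Dict.empty hnd).1
    ks[k] hmem (by simp)
  simp only [Function.comp]
  rw [this]
  simp [hk']

-- ===== VERDICT (by name: the statement is the Claim_ definition above) =====
theorem analyze_buttons_for_keywords_spec : Claim_equal_analyze_buttons_for_keywords := by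
  intro buttons keyword_sets _
  show _ = _
  rw [pvB_eq]
  unfold analyze_buttons_for_keywords
  exact pvA_eq buttons (keyword_sets.getD pvDefaultKeywordSets)
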